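-- pv_equiv track=rewrite | github.com/Liujia127/PLC-Transition-Sequence | huafen/last_ban.py | optimize_string_partition
-- ===== SOURCE A (Python) =====
-- def optimize_string_partition(array1, string2):
--     i = 0
--     array2 = []
--     while i < len(string2):
--         found = False
--         for substring in array1:
--             if string2[i:i + len(substring)] == substring:
--                 array2.append(substring)
--                 i += len(substring)
--                 found = True
--                 break
--         if not found:
--             array2.append(string2[i])
--             i += 1
--     return array2
-- ===== SOURCE B (Python) =====
-- def optimize_string_partition(array1, string2):
--     # Index the substrings by first character once; each position then only
--     # scans the (order-preserving) bucket of its own character.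
--     index = {}
--     for s in array1:
--         if s:
--             index.setdefault(s[0], []).append(s)
--     out = []
--     i = 0
--     n = len(string2)
--     while i < n:
--         piece, step = string2[i], 1
--         for s in index.get(string2[i], ()):
--             if string2.startswith(s, i):
--                 piece, step = s, len(s)
--                 break
--         out.append(piece)
--         i += step
--     return out
-- ===== Notes on version B (the rewrite author's own statement) =====
-- stated objective: faster
-- what changed: B builds a first-character index (dict of buckets) of array1 once, so each position only scans the small bucket of its own character (via startswith at an offset, no slice allocation) instead of trying every substring of array1 with a fresh slice comparison.
-- outside the precondition, e.g. on optimize_string_partition(['a', ''], 'aa'): A returns ['a', 'a'], B returns ['a', 'a']; on optimize_string_partition([''], 'a'): A does not finish within the time limit, B returns ['a']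
import Mathlib
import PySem

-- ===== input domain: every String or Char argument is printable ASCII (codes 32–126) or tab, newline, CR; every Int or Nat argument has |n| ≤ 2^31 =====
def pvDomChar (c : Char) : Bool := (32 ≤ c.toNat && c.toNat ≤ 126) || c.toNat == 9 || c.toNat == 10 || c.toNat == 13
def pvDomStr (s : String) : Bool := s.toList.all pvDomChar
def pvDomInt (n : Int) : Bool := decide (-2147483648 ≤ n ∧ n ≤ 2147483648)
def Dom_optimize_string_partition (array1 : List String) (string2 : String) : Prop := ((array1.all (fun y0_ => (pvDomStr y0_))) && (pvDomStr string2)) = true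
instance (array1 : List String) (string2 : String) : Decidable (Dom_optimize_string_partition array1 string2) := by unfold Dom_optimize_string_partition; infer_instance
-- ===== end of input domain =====

-- B indexes array1 by first character once so each position scans only its own bucket
-- instead of all of array1 (objective: faster, constant-factor).


-- ===== PORT A =====
-- while loop over the remaining suffix of string2 (fuel = |string2| is enough: inside
-- Pre_ every iteration consumes at least one character); the for/break is List.find?.
def pvGoA (arr : List (List Char)) (rest : List Char) (acc : List (List Char)) (fuel : Nat) : List (List Char) :=
  match fuel, rest with
  | _, [] => acc
  | 0, _ :: _ => acc
  | fuel + 1, c :: cs =>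
    match arr.find? (fun s => (c :: cs).take s.length == s) with
    | some s => pvGoA arr (List.drop s.length (c :: cs)) (acc ++ [s]) fuel
    | none => pvGoA arr cs (acc ++ [[c]]) fuel

def optimize_string_partition (array1 : List String) (string2 : String) : List String :=
  (pvGoA (array1.map String.toList) string2.toList [] string2.toList.length).map String.ofList

-- ===== PORT B =====
-- index.setdefault(s[0], []).append(s) over array1
def pvIndex (arr : List (List Char)) : PySem.Dict Char (List (List Char)) :=
  arr.foldl
    (fun d s =>
      match s with
      | [] => d
      | c :: _ => d.modify c [] (· ++ [s]))
    PySem.Dict.empty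

-- while loop: piece/step from the first bucket entry that is a prefix at the position
def pvGoB (idx : PySem.Dict Char (List (List Char))) (rest : List Char) (acc : List (List Char)) (fuel : Nat) : List (List Char) :=
  match fuel, rest with
  | _, [] => acc
  | 0, _ :: _ => acc
  | fuel + 1, c :: cs =>
    let bucket := idx.getD c []
    let ps : List Char × Nat :=
      match bucket.find? (fun s => s.isPrefixOf (c :: cs)) with
      | some s => (s, s.length)
      | none => ([c], 1)
    pvGoB idx (List.drop ps.2 (c :: cs)) (acc ++ [ps.1]) fuel

def optimize_string_partition_alt (array1 : List String) (string2 : String) : List String :=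
  (pvGoB (pvIndex (array1.map String.toList)) string2.toList [] string2.toList.length).map String.ofList

-- ===== PRECONDITION & SPEC =====
-- Pre_ excludes nonempty string2 with "" in array1: there A can loop forever ("" matches
-- first and i never advances); whether A still returns depends on the whole run, so the
-- whole shape is excluded even though A does return on some of these inputs.
def Pre_optimize_string_partition (array1 : List String) (string2 : String) : Prop :=
  string2 = "" ∨ "" ∉ array1
instance (array1 : List String) (string2 : String) : Decidable (Pre_optimize_string_partition array1 string2) := by unfold Pre_optimize_string_partition; infer_instance

def pvWitness_optimize_string_partition : List String × String := (["ab", "a"], "aabz")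

def Spec_optimize_string_partition (array1 : List String) (string2 : String) (out : List String) : Prop := out = optimize_string_partition_alt array1 string2
instance (array1 : List String) (string2 : String) (out : List String) : Decidable (Spec_optimize_string_partition array1 string2 out) := by unfold Spec_optimize_string_partition; infer_instance

-- ===== CLAIM (what is proved, stated in full; the proofs are below) =====
def Claim_equal_optimize_string_partition : Prop := ∀ (array1 : List String) (string2 : String), Dom_optimize_string_partition array1 string2 → Pre_optimize_string_partition array1 string2 → Spec_optimize_string_partition array1 string2 (optimize_string_partition array1 string2)

-- ===== LEMMAS AND PROOFS =====

-- the built index is exactly the first-character buckets of arr, in order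
theorem pvIndex_getD (arr : List (List Char)) (d : PySem.Dict Char (List (List Char))) (c : Char) :
    (arr.foldl
      (fun d s =>
        match s with
        | [] => d
        | c :: _ => d.modify c [] (· ++ [s]))
      d).getD c []
    = d.getD c [] ++ arr.filter (fun s => s.head? == some c) := by
  induction arr generalizing d with
  | nil => simp
  | cons s t ih =>
    cases s with
    | nil => simp [List.foldl_cons, ih]
    | cons b bs =>
      simp only [List.foldl_cons, ih, List.filter_cons]
      by_cases hbc : b = c
      · subst hbc
        simp
      · simp [PySem.Dict.getD_modify, hbc, Ne.symm hbc]

-- the two match predicates are the same boolean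
theorem pvPred_eq (s t : List Char) : (t.take s.length == s) = s.isPrefixOf t := by
  rw [Bool.eq_iff_iff, beq_iff_eq, List.isPrefixOf_iff_prefix, List.prefix_iff_eq_take]
  exact eq_comm

-- first match over all of arr = first prefix match over the bucket of c
theorem pvFind_bucket (arr : List (List Char)) (c : Char) (cs : List Char)
    (hne : [] ∉ arr) :
    arr.find? (fun s => (c :: cs).take s.length == s)
    = (arr.filter (fun s => s.head? == some c)).find? (fun s => s.isPrefixOf (c :: cs)) := by
  induction arr with
  | nil => rfl
  | cons s t ih =>
    have hsne : s ≠ [] := fun h => hne (h ▸ List.mem_cons_self ..)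
    have ht : [] ∉ t := fun h => hne (List.mem_cons_of_mem _ h)
    cases s with
    | nil => exact absurd rfl hsne
    | cons b bs =>
      by_cases hbc : b = c
      · have hq : ((b :: bs).head? == some c) = true := by simp [hbc]
        have hf : List.filter (fun s => s.head? == some c) ((b :: bs) :: t)
            = (b :: bs) :: List.filter (fun s => s.head? == some c) t := by
          simp [hbc]
        rw [hf, List.find?_cons, List.find?_cons, pvPred_eq]
        cases hp : (b :: bs).isPrefixOf (c :: cs)
        · exact ih ht
        · simp
      · have hnp : ((c :: cs).take (b :: bs).length == (b :: bs)) = false := by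
          simp only [List.length_cons, List.take_succ_cons, beq_eq_false_iff_ne, ne_eq,
            List.cons.injEq, not_and]
          intro h; exact absurd h.symm hbc
        simp only [List.find?_cons, hnp, List.filter_cons, List.head?_cons]
        have : ((some b == some c) : Bool) = false := by simp [hbc]
        simp [this, ih ht]

-- main loop equivalence: A's scan over arr = B's scan over the bucket
theorem pvGo_eq (arr : List (List Char)) (hne : [] ∉ arr) :
    ∀ (fuel : Nat) (rest : List Char) (acc : List (List Char)),
      pvGoA arr rest acc fuel = pvGoB (pvIndex arr) rest acc fuel := by
  intro fuel
  induction fuel with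
  | zero => intro rest acc; cases rest <;> rfl
  | succ n ih =>
    intro rest acc
    cases rest with
    | nil => rfl
    | cons c cs =>
      have hbucket : (pvIndex arr).getD c [] = arr.filter (fun s => s.head? == some c) := by
        simpa using pvIndex_getD arr PySem.Dict.empty c
      simp only [pvGoA, pvGoB, hbucket, ← pvFind_bucket arr c cs hne]
      cases h : arr.find? (fun s => (c :: cs).take s.length == s) with
      | none => simpa using ih cs (acc ++ [[c]])
      | some s => simpa using ih (List.drop s.length (c :: cs)) (acc ++ [s])

theorem pvEmpty_notin (array1 : List String) (h : "" ∉ array1) :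
    [] ∉ array1.map String.toList := by
  intro hmem
  rcases List.mem_map.mp hmem with ⟨s, hs, hls⟩
  have : s = "" := by simpa using hls
  exact h (this ▸ hs)

-- ===== VERDICT (by name: the statement is the Claim_ definition above) =====
theorem optimize_string_partition_spec : Claim_equal_optimize_string_partition := by
  intro array1 string2 _ hpre
  unfold Spec_optimize_string_partition optimize_string_partition optimize_string_partition_alt
  rcases hpre with h | h
  · subst h; rfl
  · rw [pvGo_eq (array1.map String.toList) (pvEmpty_notin array1 h)]
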